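-- pv_equiv track=rewrite | github.com/2mill/python_thing | csv_processor.py | translate_symbols_to_bin
-- ===== SOURCE A (Python) =====
-- from typing import Union
--
-- def translate_used_symbols(symbol: str) -> int:
-- 	return 1 if symbol == 'X' else 0
--
-- def translate_symbols_to_bin(port_usage) -> Union[int, bool]:
-- 	if port_usage == "undefined": return False
-- 	temp: list[str] = port_usage.split(' ')
-- 	temp.reverse()
-- 	total: int = 0;
-- 	for x in range(len(temp)):
-- 		total = total + (2**x)*(translate_used_symbols(temp[x]))
-- 	return total
-- ===== SOURCE B (Python) =====
-- def translate_symbols_to_bin(port_usage):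
-- 	if port_usage == "undefined": return False
-- 	total = 0
-- 	for symbol in port_usage.split(' '):
-- 		total = total * 2 + (1 if symbol == 'X' else 0)
-- 	return total
-- ===== Notes on version B (the rewrite author's own statement) =====
-- stated objective: simpler
-- what changed: B drops the reverse and the per-index power 2**x: it folds over the split symbols left-to-right with Horner's rule (total = total*2 + bit), keeping the same 'undefined' guard.
-- outside the precondition, e.g. on translate_symbols_to_bin('undefined'): A returns False, B returns False
import Mathlib
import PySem

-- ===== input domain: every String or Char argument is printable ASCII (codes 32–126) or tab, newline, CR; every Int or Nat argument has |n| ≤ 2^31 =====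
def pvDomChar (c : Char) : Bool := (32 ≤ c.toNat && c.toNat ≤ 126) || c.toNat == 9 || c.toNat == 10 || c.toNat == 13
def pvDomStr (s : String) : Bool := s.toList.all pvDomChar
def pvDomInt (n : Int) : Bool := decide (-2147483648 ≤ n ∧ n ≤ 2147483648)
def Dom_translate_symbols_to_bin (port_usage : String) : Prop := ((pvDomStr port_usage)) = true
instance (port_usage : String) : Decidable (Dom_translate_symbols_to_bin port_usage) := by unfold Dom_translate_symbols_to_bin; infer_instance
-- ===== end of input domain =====

-- B replaces reverse + positional powers of two with a single left-to-right Horner pass (objective: simpler).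
-- On "undefined" Python A and B both return False (== 0); the ports return 0 there.

-- ===== PORT A =====
def translate_used_symbols (symbol : String) : Int :=
  if symbol == "X" then 1 else 0

def translate_symbols_to_bin (port_usage : String) : Int :=
  if port_usage == "undefined" then 0  -- Python: False (numerically 0)
  else
    let temp : List String := ((PySem.Str.split? port_usage " ").getD []).reverse
    (PySem.List.pyRange 0 (PySem.List.len temp)).foldl
      (fun total x => total + 2 ^ x.toNat * translate_used_symbols (PySem.List.pyGetD temp x ""))
      0

-- ===== PORT B =====
def translate_symbols_to_bin_alt (port_usage : String) : Int :=
  if port_usage == "undefined" then 0  -- Python: False (numerically 0)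
  else
    ((PySem.Str.split? port_usage " ").getD []).foldl
      (fun total symbol => total * 2 + (if symbol == "X" then 1 else 0)) 0

-- ===== PRECONDITION & SPEC =====
-- Pre_ excludes only the input "undefined", on which A (and B) return the bool False rather than an int.
def Pre_translate_symbols_to_bin (port_usage : String) : Prop := port_usage ≠ "undefined"
instance (port_usage : String) : Decidable (Pre_translate_symbols_to_bin port_usage) := by unfold Pre_translate_symbols_to_bin; infer_instance
def pvWitness_translate_symbols_to_bin : String := "X . X"

def Spec_translate_symbols_to_bin (port_usage : String) (out : Int) : Prop := out = translate_symbols_to_bin_alt port_usage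
instance (port_usage : String) (out : Int) : Decidable (Spec_translate_symbols_to_bin port_usage out) := by unfold Spec_translate_symbols_to_bin; infer_instance

-- ===== CLAIM (what is proved, stated in full; the proofs are below) =====
def Claim_equal_translate_symbols_to_bin : Prop := ∀ (port_usage : String), Dom_translate_symbols_to_bin port_usage → Pre_translate_symbols_to_bin port_usage → Spec_translate_symbols_to_bin port_usage (translate_symbols_to_bin port_usage)

-- ===== LEMMAS AND PROOFS =====

-- the weighted sum A computes over the reversed list
def pvW (r : List String) : Int :=
  ((List.range r.length).map (fun k => 2 ^ k * translate_used_symbols (r.getD k ""))).sum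

lemma pvA_foldl_eq_W (r : List String) :
    (PySem.List.pyRange 0 (PySem.List.len r)).foldl
      (fun total x => total + 2 ^ x.toNat * translate_used_symbols (PySem.List.pyGetD r x "")) 0
    = pvW r := by
  simp [PySem.List.len, PySem.List.pyRange_zero_nat, List.foldl_map,
    PySem.List.foldl_add, pvW]

lemma pvW_append_singleton (r : List String) (a : String) :
    pvW (r ++ [a]) = pvW r + 2 ^ r.length * translate_used_symbols a := by
  unfold pvW
  simp only [List.length_append, List.length_cons, List.length_nil, Nat.zero_add,
    List.range_succ, List.map_append, List.sum_append, List.map_cons, List.map_nil,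
    List.sum_cons, List.sum_nil]
  rw [List.map_congr_left (g := fun k => 2 ^ k * translate_used_symbols (r.getD k ""))]
  · simp [List.getD]
  · intro k hk
    simp only [List.mem_range] at hk
    simp [List.getD, List.getElem?_append_left hk]

lemma pvHorner_shift (l : List String) (t : Int) :
    l.foldl (fun total symbol => total * 2 + (if symbol == "X" then 1 else 0)) t
    = t * 2 ^ l.length
      + l.foldl (fun total symbol => total * 2 + (if symbol == "X" then 1 else 0)) 0 := by
  induction l generalizing t with
  | nil => simp
  | cons a l ih =>
    simp only [List.foldl_cons, List.length_cons]
    rw [ih (t * 2 + _), ih (0 * 2 + _)]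
    ring

lemma pvW_reverse_eq_horner (l : List String) :
    pvW l.reverse
    = l.foldl (fun total symbol => total * 2 + (if symbol == "X" then 1 else 0)) 0 := by
  induction l with
  | nil => simp [pvW]
  | cons a l ih =>
    have : (a :: l).reverse = l.reverse ++ [a] := by simp
    rw [this, pvW_append_singleton, ih, List.foldl_cons]
    conv_rhs => rw [pvHorner_shift]
    simp only [translate_used_symbols, beq_iff_eq, List.length_reverse]
    split_ifs <;> ring

-- ===== VERDICT (by name: the statement is the Claim_ definition above) =====
theorem translate_symbols_to_bin_spec : Claim_equal_translate_symbols_to_bin := by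
  intro port_usage _ hpre
  unfold Spec_translate_symbols_to_bin translate_symbols_to_bin translate_symbols_to_bin_alt
  have h : (port_usage == "undefined") = false := by
    simpa using hpre
  simp only [h, Bool.false_eq_true, if_false]
  rw [pvA_foldl_eq_W, pvW_reverse_eq_horner]
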